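-- pv_equiv track=rewrite | github.com/percy-lcx/mdfier | mdfier.py | _join_inline
-- ===== SOURCE A (Python) =====
-- def _join_inline(parts):
--     """Join inline parts, ensuring spaces around markdown links."""
--     result = []
--     for part in parts:
--         if not part:
--             continue
--         if result:
--             prev = result[-1]
--             needs_space = (
--                 (part.startswith("[") and prev and not prev[-1].isspace())
--                 or (prev.endswith(")") and part and not part[0].isspace()
--                     and part[0] not in ".,;:!?)")
--                 or (part.startswith("**") and prev and prev[-1] not in " \t\n([")
--                 or (prev.endswith("**") and part and part[0] not in " \t\n.,;:!?)]")
--             )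
--             if needs_space:
--                 result.append(" ")
--         result.append(part)
--     return "".join(result)
-- ===== SOURCE B (Python) =====
-- def _join_inline(parts):
--     """Join inline parts, ensuring spaces around markdown links.
--
--     Right-to-left pass: walk the parts in reverse carrying only the first
--     character and a leading-'**' flag of the following non-empty part, emit
--     the pieces back-to-front, and reverse-join at the end.
--     """
--     pieces = []
--     nxt = None  # (first char, startswith('**')) of the following non-empty part
--     for p in reversed(parts):
--         if not p:
--             continue
--         if nxt is not None:
--             c0, nstar = nxt
--             last = p[-1]
--             if ((c0 == "[" and not last.isspace())
--                     or (last == ")" and not c0.isspace() and c0 not in ".,;:!?)")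
--                     or (nstar and last not in " \t\n([")
--                     or (p.endswith("**") and c0 not in " \t\n.,;:!?)]")):
--                 pieces.append(" ")
--         pieces.append(p)
--         nxt = (p[0], p.startswith("**"))
--     return "".join(reversed(pieces))
-- ===== Notes on version B (the rewrite author's own statement) =====
-- stated objective: alternative
-- what changed: B walks the parts right-to-left carrying only an O(1) lookahead state (first character and leading-'**' flag of the following non-empty part), emits the pieces back-to-front and reverse-joins, instead of A's left-to-right accumulation that peeks at result[-1] and re-tests the previous string with startswith/endswith.
import Mathlib
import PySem

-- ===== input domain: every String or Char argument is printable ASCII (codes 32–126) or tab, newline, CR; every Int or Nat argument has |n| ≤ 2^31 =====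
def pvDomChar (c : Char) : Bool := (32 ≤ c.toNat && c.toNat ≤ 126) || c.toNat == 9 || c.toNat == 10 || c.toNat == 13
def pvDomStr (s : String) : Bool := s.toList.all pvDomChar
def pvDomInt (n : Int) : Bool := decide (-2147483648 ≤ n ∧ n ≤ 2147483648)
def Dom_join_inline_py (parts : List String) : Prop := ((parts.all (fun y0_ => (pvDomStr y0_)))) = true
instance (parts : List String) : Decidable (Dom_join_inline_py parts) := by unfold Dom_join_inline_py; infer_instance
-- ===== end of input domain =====

-- B traverses the parts right-to-left with a constant-size lookahead state instead of
-- A's left-to-right accumulation peeking at result[-1]; same return value, no speed claim.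

-- ===== PORT A =====
-- A's loop: accumulate `result`, peeking at result[-1]; the needs_space boolean is inline, as in A.
def join_inline_py (parts : List String) : String :=
  let result := parts.foldl
    (fun result part =>
      if part == "" then result
      else
        let result :=
          if result.isEmpty then result
          else
            let prev := ((PySem.List.pyGet? result (-1)).getD "").toList
            let pt := part.toList
            let needs_space :=
              (PySem.Chars.startswith pt "[".toList && !prev.isEmpty
                 && !(PySem.Chars.isspace (prev.getLast?.getD ' ')))
              || (PySem.Chars.endswith prev ")".toList && !pt.isEmpty
                 && !(PySem.Chars.isspace (pt.head?.getD ' '))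
                 && !(".,;:!?)".toList.contains (pt.head?.getD ' ')))
              || (PySem.Chars.startswith pt "**".toList && !prev.isEmpty
                 && !(" \t\n([".toList.contains (prev.getLast?.getD ' ')))
              || (PySem.Chars.endswith prev "**".toList && !pt.isEmpty
                 && !(" \t\n.,;:!?)]".toList.contains (pt.head?.getD ' ')))
            if needs_space then result ++ [" "] else result
        result ++ [part])
    ([] : List String)
  PySem.Str.join "" result

-- ===== PORT B =====
-- Source B's space test between part p and the following non-empty part, given only that
-- part's first char c0 and its leading-'**' flag nstar (the lookahead state).
def pvNeedsSpaceB (p : String) (c0 : Char) (nstar : Bool) : Bool :=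
  let pv := p.toList
  let last := pv.getLast?.getD ' '
  (c0 == '[' && !(PySem.Chars.isspace last))
  || (last == ')' && !(PySem.Chars.isspace c0) && !(".,;:!?)".toList.contains c0))
  || (nstar && !(" \t\n([".toList.contains last))
  || (PySem.Chars.endswith pv "**".toList && !(" \t\n.,;:!?)]".toList.contains c0))

-- one step of Source B's reversed loop: state = (pieces so far, lookahead of the following part)
def pvStepRev (st : List String × Option (Char × Bool)) (p : String) :
    List String × Option (Char × Bool) :=
  if p == "" then st
  else
    let pieces :=
      match st.2 with
      | none => st.1
      | some (c0, nstar) => if pvNeedsSpaceB p c0 nstar then st.1 ++ [" "] else st.1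
    (pieces ++ [p], some (p.toList.head?.getD ' ', PySem.Chars.startswith p.toList "**".toList))

-- Source B: fold over reversed(parts), then "".join(reversed(pieces))
def join_inline_py_alt (parts : List String) : String :=
  let st := parts.reverse.foldl pvStepRev (([], none) : List String × Option (Char × Bool))
  PySem.Str.join "" st.1.reverse

-- ===== PRECONDITION & SPEC =====
def Spec_join_inline_py (parts : List String) (out : String) : Prop := out = join_inline_py_alt parts
instance (parts : List String) (out : String) : Decidable (Spec_join_inline_py parts out) := by unfold Spec_join_inline_py; infer_instance

-- ===== CLAIM (what is proved, stated in full; the proofs are below) =====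
def Claim_equal_join_inline_py : Prop := ∀ (parts : List String), Dom_join_inline_py parts → Spec_join_inline_py parts (join_inline_py parts)

-- ===== LEMMAS AND PROOFS =====

-- A's space test between consecutive non-empty parts (proof-side characterisation)
def pvNeedsSpace (prev part : String) : Bool :=
  let pv := prev.toList
  let pt := part.toList
  (PySem.Chars.startswith pt "[".toList && !pv.isEmpty
     && !(PySem.Chars.isspace (pv.getLast?.getD ' ')))
  || (PySem.Chars.endswith pv ")".toList && !pt.isEmpty
     && !(PySem.Chars.isspace (pt.head?.getD ' '))
     && !(".,;:!?)".toList.contains (pt.head?.getD ' ')))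
  || (PySem.Chars.startswith pt "**".toList && !pv.isEmpty
     && !(" \t\n([".toList.contains (pv.getLast?.getD ' ')))
  || (PySem.Chars.endswith pv "**".toList && !pt.isEmpty
     && !(" \t\n.,;:!?)]".toList.contains (pt.head?.getD ' ')))

-- the common "rest of the output after prev" list, used to characterise both loops
def pvTail (prev : String) : List String → List String
  | [] => []
  | q :: qs => (if pvNeedsSpace prev q then [" "] else []) ++ q :: pvTail q qs

-- A's fold step (the lambda of join_inline_py, named for the proofs)
def pvStepA (result : List String) (part : String) : List String :=
  if part == "" then result
  else
    let result :=
      if result.isEmpty then result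
      else
        let prev := ((PySem.List.pyGet? result (-1)).getD "").toList
        let pt := part.toList
        let needs_space :=
          (PySem.Chars.startswith pt "[".toList && !prev.isEmpty
             && !(PySem.Chars.isspace (prev.getLast?.getD ' ')))
          || (PySem.Chars.endswith prev ")".toList && !pt.isEmpty
             && !(PySem.Chars.isspace (pt.head?.getD ' '))
             && !(".,;:!?)".toList.contains (pt.head?.getD ' ')))
          || (PySem.Chars.startswith pt "**".toList && !prev.isEmpty
             && !(" \t\n([".toList.contains (prev.getLast?.getD ' ')))
          || (PySem.Chars.endswith prev "**".toList && !pt.isEmpty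
             && !(" \t\n.,;:!?)]".toList.contains (pt.head?.getD ' ')))
        if needs_space then result ++ [" "] else result
    result ++ [part]

lemma pvStepA_snoc (acc : List String) (x part : String) (h : part ≠ "") :
    pvStepA (acc ++ [x]) part =
      (acc ++ [x]) ++ ((if pvNeedsSpace x part then [" "] else []) ++ [part]) := by
  simp [pvStepA, pvNeedsSpace, h, PySem.List.pyGet?_neg_one_append_singleton]
  split <;> simp

lemma pvFoldA_snoc (ps : List String) (acc : List String) (x : String) :
    ps.foldl pvStepA (acc ++ [x]) =
      (acc ++ [x]) ++ pvTail x (ps.filter (fun p => p != "")) := by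
  induction ps generalizing acc x with
  | nil => simp [pvTail]
  | cons p ps ih =>
    by_cases h : p = ""
    · simp [h, pvStepA, ih]
    · have hf : (p != "") = true := by simp [h]
      simp only [List.foldl_cons, List.filter_cons, hf, if_pos]
      rw [pvStepA_snoc acc x p h]
      by_cases hn : pvNeedsSpace x p
      · have := ih (acc ++ [x] ++ [" "]) p
        simp [hn, pvTail] at this ⊢
        exact this
      · have := ih (acc ++ [x]) p
        simp [hn, pvTail] at this ⊢
        exact this

lemma pvFoldA_nil (ps : List String) :
    ps.foldl pvStepA [] =
      (match ps.filter (fun p => p != "") with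
       | [] => []
       | p :: r => p :: pvTail p r) := by
  induction ps with
  | nil => simp
  | cons p ps ih =>
    by_cases h : p = ""
    · simp [h, pvStepA, ih]
    · have hf : (p != "") = true := by simp [h]
      simp only [List.foldl_cons, List.filter_cons, hf, if_pos]
      have : pvStepA [] p = [p] := by simp [pvStepA, h]
      rw [this, show [p] = ([] : List String) ++ [p] by simp, pvFoldA_snoc]
      simp

-- single-char suffix test = last character test (nonempty list)
lemma pvIsSuffix_singleton (x a b : Char) (bs : List Char) :
    [x].isSuffixOf (a :: b :: bs) = [x].isSuffixOf (b :: bs) := by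
  rw [Bool.eq_iff_iff]
  simp [List.isSuffixOf_iff_suffix, List.suffix_cons_iff]

lemma pvEndswith_singleton (x : Char) (l : List Char) (h : l ≠ []) :
    PySem.Chars.endswith l [x] = (l.getLast?.getD ' ' == x) := by
  induction l with
  | nil => simp at h
  | cons a as ih =>
    cases as with
    | nil =>
      show [x].isSuffixOf [a] = _
      simp [List.isSuffixOf, List.isPrefixOf, eq_comm]
    | cons b bs =>
      rw [show PySem.Chars.endswith (a :: b :: bs) [x] = PySem.Chars.endswith (b :: bs) [x] from
            pvIsSuffix_singleton x a b bs, ih (by simp)]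
      simp

-- on nonempty strings, B's lookahead test equals A's pairwise test
lemma pvNeedsSpaceB_eq (p q : String) (hp : p.toList ≠ []) (hq : q.toList ≠ []) :
    pvNeedsSpaceB p (q.toList.head?.getD ' ') (PySem.Chars.startswith q.toList "**".toList)
      = pvNeedsSpace p q := by
  obtain ⟨c, cs, hcs⟩ := List.exists_cons_of_ne_nil hq
  obtain ⟨a, as, has⟩ := List.exists_cons_of_ne_nil hp
  have e1 : PySem.Chars.startswith (c :: cs) "[".toList = ((c :: cs).head?.getD ' ' == '[') := by
    simp [PySem.Chars.startswith, List.isPrefixOf, eq_comm]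
  simp only [pvNeedsSpaceB, pvNeedsSpace, hcs, has, e1]
  rw [show (")".toList) = [')'] from rfl, pvEndswith_singleton ')' (a :: as) (by simp)]
  simp

-- Source B's step skips empty parts: filtering first changes nothing
lemma pvFoldrRev_filter (l : List String) :
    l.foldr (fun p st => pvStepRev st p) (([], none) : List String × Option (Char × Bool))
      = (l.filter (fun p => p != "")).foldr (fun p st => pvStepRev st p) ([], none) := by
  induction l with
  | nil => rfl
  | cons p ps ih =>
    by_cases h : p = ""
    · subst h
      simp only [List.foldr_cons, List.filter_cons, show (("" != "") = false) from rfl,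
        Bool.false_eq_true, if_false]
      rw [show ∀ st : List String × Option (Char × Bool), pvStepRev st "" = st from
            fun st => rfl]
      exact ih
    · have hf : (p != "") = true := by simp [h]
      simp only [List.foldr_cons, List.filter_cons, hf, if_pos, ih]

-- Source B's reversed loop on the filtered list computes (reverse of A's output, lookahead of the head)
lemma pvFoldrRev_spec (rest : List String) (p : String) (hp : p ≠ "")
    (hrest : ∀ q ∈ rest, q ≠ "") :
    (p :: rest).foldr (fun q st => pvStepRev st q)
        (([], none) : List String × Option (Char × Bool))
      = ((p :: pvTail p rest).reverse,
         some (p.toList.head?.getD ' ', PySem.Chars.startswith p.toList "**".toList)) := by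
  induction rest generalizing p with
  | nil => simp [pvStepRev, hp, pvTail]
  | cons q qs ih =>
    have hq : q ≠ "" := hrest q (by simp)
    have hqs : ∀ r ∈ qs, r ≠ "" := fun r hr => hrest r (by simp [hr])
    have hrec := ih q hq hqs
    simp only [List.foldr_cons] at hrec ⊢
    rw [hrec]
    have hp' : p.toList ≠ [] := by simpa using hp
    have hq' : q.toList ≠ [] := by simpa using hq
    have hbr := pvNeedsSpaceB_eq p q hp' hq'
    have hpb : (p == "") = false := by simp [hp]
    simp only [pvStepRev, hpb, Bool.false_eq_true, if_false, hbr]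
    by_cases hn : pvNeedsSpace p q
    · simp [hn, pvTail]
    · simp [hn, pvTail]

-- ===== VERDICT (by name: the statement is the Claim_ definition above) =====
theorem join_inline_py_spec : Claim_equal_join_inline_py := by
  intro parts _
  unfold Spec_join_inline_py join_inline_py join_inline_py_alt
  have hA : parts.foldl
      (fun result part =>
        if part == "" then result
        else
          let result :=
            if result.isEmpty then result
            else
              let prev := ((PySem.List.pyGet? result (-1)).getD "").toList
              let pt := part.toList
              let needs_space :=
                (PySem.Chars.startswith pt "[".toList && !prev.isEmpty
                   && !(PySem.Chars.isspace (prev.getLast?.getD ' ')))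
                || (PySem.Chars.endswith prev ")".toList && !pt.isEmpty
                   && !(PySem.Chars.isspace (pt.head?.getD ' '))
                   && !(".,;:!?)".toList.contains (pt.head?.getD ' ')))
                || (PySem.Chars.startswith pt "**".toList && !prev.isEmpty
                   && !(" \t\n([".toList.contains (prev.getLast?.getD ' ')))
                || (PySem.Chars.endswith prev "**".toList && !pt.isEmpty
                   && !(" \t\n.,;:!?)]".toList.contains (pt.head?.getD ' ')))
              if needs_space then result ++ [" "] else result
          result ++ [part]) ([] : List String)
      = parts.foldl pvStepA [] := rfl
  rw [hA, pvFoldA_nil]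
  rw [show List.foldl pvStepRev (([], none) : List String × Option (Char × Bool)) parts.reverse
        = parts.foldr (fun p st => pvStepRev st p) ([], none) from by rw [List.foldl_reverse],
    pvFoldrRev_filter]
  cases hne : parts.filter (fun p => p != "") with
  | nil => rfl
  | cons p0 rest =>
    have hmem : ∀ q ∈ p0 :: rest, q ≠ "" := by
      intro q hqmem
      have : q ∈ parts.filter (fun p => p != "") := hne ▸ hqmem
      have := (List.mem_filter.mp this).2
      simpa using this
    rw [pvFoldrRev_spec rest p0 (hmem p0 (by simp)) (fun q hq => hmem q (by simp [hq]))]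
    simp
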